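-- pv_equiv track=rewrite | github.com/nestcx/pywordle | pywordle/examples/maximise_similarity/maximise_similarity.py | get_cleanup_word
-- ===== SOURCE A (Python) =====
-- from collections import Counter
--
-- def get_rm_freq(remaining_words):
--     return Counter(''.join(remaining_words))
--
-- def get_dm_freq(direct_matches):
--     dm_freq = {}
--     for m in direct_matches:
--         dm_freq[m] = len(direct_matches[m])
--     return dm_freq
--
-- def elim_m(remaining_words, dm_freq, rm_freq):
--     letters = set(''.join(remaining_words))
--     rem = []
--     for l in letters:
--         if l not in dm_freq:
--             rem.append(l)
--         else:
--             if rm_freq[l] != dm_freq[l] * len(remaining_words):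
--                 rem.append(l)
--
--     return rem
--
-- def find_intersections(wordlist, letters):
--     d = {0: [], 1: [], 2: [], 3: [], 4: [], 5: []}
--     for w in wordlist:
--         x = len(letters.intersection(w))
--         d[x].append(w)
--     return d
--
-- def get_cleanup_word(all_words, remaining_words, direct_matches):
--     rm_freq = get_rm_freq(remaining_words)
--     dm_freq = get_dm_freq(direct_matches)
--     rem = elim_m(remaining_words, dm_freq, rm_freq)
--     ints = find_intersections(all_words, set(rem))
--
--     word = ''
--     for i in range(5, 0, -1):
--         if ints[i] != []:
--             word = ints[i][0]
--             break
--
--     return word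
-- ===== SOURCE B (Python) =====
-- from collections import Counter
--
-- def get_cleanup_word(all_words, remaining_words, direct_matches):
--     joined = ''.join(remaining_words)
--     freq = Counter(joined)
--     n = len(remaining_words)
--     rem = {l for l in joined
--            if l not in direct_matches or freq[l] != len(direct_matches[l]) * n}
--     best, best_count = '', 0
--     for w in all_words:
--         c = len(rem.intersection(w))
--         if c > best_count:
--             best, best_count = w, c
--     return best
-- ===== Notes on version B (the rewrite author's own statement) =====
-- stated objective: simpler
-- what changed: Replaces the dm_freq length-dict, the elim_m set-iteration loop and the six-bucket dict plus descending bucket scan by a set comprehension for the eliminated letters and a single strict-argmax pass over all_words (first word with the largest positive intersection wins, '' otherwise).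
import Mathlib
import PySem

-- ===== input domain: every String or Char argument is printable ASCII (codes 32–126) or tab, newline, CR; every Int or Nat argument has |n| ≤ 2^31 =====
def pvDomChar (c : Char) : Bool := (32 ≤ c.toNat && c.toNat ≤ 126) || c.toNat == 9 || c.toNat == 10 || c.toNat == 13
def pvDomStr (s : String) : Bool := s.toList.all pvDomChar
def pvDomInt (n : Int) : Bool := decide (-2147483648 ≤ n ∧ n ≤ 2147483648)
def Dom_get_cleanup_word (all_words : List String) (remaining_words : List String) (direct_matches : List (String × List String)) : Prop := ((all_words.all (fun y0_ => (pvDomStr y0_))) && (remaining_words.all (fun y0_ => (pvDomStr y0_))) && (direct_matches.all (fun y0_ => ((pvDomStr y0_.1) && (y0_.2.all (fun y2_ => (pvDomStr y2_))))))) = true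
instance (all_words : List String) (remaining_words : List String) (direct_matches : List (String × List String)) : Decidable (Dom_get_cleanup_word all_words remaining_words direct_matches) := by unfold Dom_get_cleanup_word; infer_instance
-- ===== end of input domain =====

-- B replaces A's length-dict, set-iteration loop and six-bucket scan by a set comprehension
-- for the eliminated letters and one strict-argmax pass (objective: simpler).


-- ===== PORT A =====
def get_rm_freq (remaining_words : List String) : PySem.Dict Char Int :=
  PySem.Dict.counter (PySem.Str.join "" remaining_words).toList

-- direct_matches[m] with m drawn from the dict's own keys: getD [] is exact (key present)
def get_dm_freq (direct_matches : PySem.Dict String (List String)) : PySem.Dict String Int :=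
  direct_matches.keys.foldl
    (fun d m => d.insert m ((direct_matches.getD m []).length : Int)) PySem.Dict.empty

-- iteration over the Python set 'letters' is ported in first-occurrence order; the result is
-- only ever consumed as a set, so the output does not depend on that order.
-- rm_freq[l] is a Counter lookup (0 when absent): getD l 0 is exact;
-- dm_freq[l] is only read when 'l in dm_freq': getD 0 is exact there.
def elim_m (remaining_words : List String) (dm_freq : PySem.Dict String Int) (rm_freq : PySem.Dict Char Int) : List Char :=
  let letters : PySem.Set Char := PySem.Set.ofList (PySem.Str.join "" remaining_words).toList
  letters.foldl (fun r l =>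
    if dm_freq.contains (String.mk [l]) = false then r ++ [l]
    else if rm_freq.getD l 0 ≠ dm_freq.getD (String.mk [l]) 0 * (remaining_words.length : Int) then r ++ [l]
    else r) []

-- Python d[x].append(w) raises KeyError when x ∉ 0..5 (modify would insert instead);
-- exactly those inputs are excluded by Pre_get_cleanup_word.
def find_intersections (wordlist : List String) (letters : PySem.Set Char) : PySem.Dict Int (List String) :=
  wordlist.foldl
    (fun d w => d.modify (PySem.Set.len (PySem.Set.inter letters w.toList)) [] (· ++ [w]))
    (PySem.Dict.mk [(0, []), (1, []), (2, []), (3, []), (4, []), (5, [])])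

-- the 'for i in range(5,0,-1): … break' loop; ints[i] with i ∈ 1..5 is always a key
-- (getD [] exact) and ints[i][0] is read only on the nonempty branch (headD exact).
def cleanup_pick (ints : PySem.Dict Int (List String)) : List Int → String
  | [] => ""
  | i :: rest =>
      if ints.getD i [] ≠ [] then (ints.getD i []).headD "" else cleanup_pick ints rest

def get_cleanup_word (all_words : List String) (remaining_words : List String) (direct_matches : List (String × List String)) : String :=
  let rm_freq := get_rm_freq remaining_words
  let dm_freq := get_dm_freq (PySem.Dict.mk direct_matches)
  let rem := elim_m remaining_words dm_freq rm_freq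
  let ints := find_intersections all_words (PySem.Set.ofList rem)
  cleanup_pick ints (PySem.List.pyRange 5 0 (-1))

-- ===== PORT B =====
-- 'l not in direct_matches' / direct_matches[l] compare the 1-char string of l with the keys
def get_cleanup_word_alt (all_words : List String) (remaining_words : List String) (direct_matches : List (String × List String)) : String :=
  let joined := (PySem.Str.join "" remaining_words).toList
  let freq := PySem.Dict.counter joined
  let dm := PySem.Dict.mk direct_matches
  let n : Int := remaining_words.length
  let rem : PySem.Set Char := joined.foldl (fun s l =>
    if dm.contains (String.mk [l]) = false ∨ freq.getD l 0 ≠ ((dm.getD (String.mk [l]) []).length : Int) * n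
    then PySem.Set.add s l else s) PySem.Set.empty
  (all_words.foldl (fun (bc : String × Int) w =>
      let c := PySem.Set.len (PySem.Set.inter rem w.toList)
      if bc.2 < c then (w, c) else bc)
    ("", 0)).1

-- ===== PRECONDITION & SPEC =====
-- membership condition of the eliminated-letter set: l survives elimination iff it is not a key
-- of direct_matches or its total frequency differs from dm-length * number of remaining words
def pvRemCond (remaining_words : List String) (direct_matches : List (String × List String)) (l : Char) : Bool :=
  !(PySem.Dict.mk direct_matches).contains (String.mk [l]) ||
    ((PySem.Str.join "" remaining_words).toList.count l : Int)
      != ((PySem.Dict.mk direct_matches).getD (String.mk [l]) []).length * (remaining_words.length : Int)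

def pvElimLetters (remaining_words : List String) (direct_matches : List (String × List String)) : List Char :=
  (PySem.List.dedup (PySem.Str.join "" remaining_words).toList).filter (pvRemCond remaining_words direct_matches)

-- Pre_ excludes exactly the inputs on which A raises KeyError in find_intersections:
-- some word of all_words shares more than 5 distinct letters with the eliminated-letter set.
def Pre_get_cleanup_word (all_words : List String) (remaining_words : List String) (direct_matches : List (String × List String)) : Prop :=
  ∀ w ∈ all_words, ((pvElimLetters remaining_words direct_matches).filter (fun l => l ∈ w.toList)).length ≤ 5

instance (all_words : List String) (remaining_words : List String) (direct_matches : List (String × List String)) : Decidable (Pre_get_cleanup_word all_words remaining_words direct_matches) := by unfold Pre_get_cleanup_word; infer_instance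

def pvWitness_get_cleanup_word : List String × List String × (List (String × List String)) :=
  (["bead", "cafe"], ["ab", "cd"], [("a", ["x"])])

def Spec_get_cleanup_word (all_words : List String) (remaining_words : List String) (direct_matches : List (String × List String)) (out : String) : Prop := out = get_cleanup_word_alt all_words remaining_words direct_matches
instance (all_words : List String) (remaining_words : List String) (direct_matches : List (String × List String)) (out : String) : Decidable (Spec_get_cleanup_word all_words remaining_words direct_matches out) := by unfold Spec_get_cleanup_word; infer_instance

-- ===== CLAIM (what is proved, stated in full; the proofs are below) =====
def Claim_equal_get_cleanup_word : Prop := ∀ (all_words : List String) (remaining_words : List String) (direct_matches : List (String × List String)), Dom_get_cleanup_word all_words remaining_words direct_matches → Pre_get_cleanup_word all_words remaining_words direct_matches → Spec_get_cleanup_word all_words remaining_words direct_matches (get_cleanup_word all_words remaining_words direct_matches)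


-- ===== LEMMAS AND PROOFS =====

-- get? of an insert-loop writing v m at each key m
theorem pvFoldlInsertGet {κ ν : Type} [BEq κ] [LawfulBEq κ] [DecidableEq κ] (v : κ → ν) :
    ∀ (ks : List κ) (d : PySem.Dict κ ν) (s : κ),
      (ks.foldl (fun d m => d.insert m (v m)) d).get? s
        = if s ∈ ks then some (v s) else d.get? s := by
  intro ks
  induction ks with
  | nil => intro d s; simp
  | cons m t ih =>
      intro d s
      simp only [List.foldl_cons, ih, PySem.Dict.get?_insert, List.mem_cons]
      by_cases h1 : s ∈ t <;> by_cases h2 : s = m <;> simp [h1, h2]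

theorem pvDmFreqGet (dm : PySem.Dict String (List String)) (s : String) :
    (get_dm_freq dm).get? s
      = if s ∈ dm.keys then some ((dm.getD s []).length : Int) else none := by
  unfold get_dm_freq
  rw [pvFoldlInsertGet (fun m => ((dm.getD m []).length : Int)) dm.keys PySem.Dict.empty s]
  rfl

theorem pvDmFreqContains (dm : PySem.Dict String (List String)) (s : String) :
    (get_dm_freq dm).contains s = dm.contains s := by
  rw [PySem.Dict.contains_eq_isSome_get?, pvDmFreqGet, PySem.Dict.contains_eq_decide_mem_keys]
  by_cases h : s ∈ dm.keys <;> simp [h]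

theorem pvDmFreqGetD (dm : PySem.Dict String (List String)) (s : String) (h : s ∈ dm.keys) :
    (get_dm_freq dm).getD s 0 = ((dm.getD s []).length : Int) := by
  rw [PySem.Dict.getD_eq_get?_getD, pvDmFreqGet]
  simp [h]

-- the elimination condition of elim_m, expressed through pvRemCond
theorem pvElimEq (remaining_words : List String) (direct_matches : List (String × List String)) :
    elim_m remaining_words (get_dm_freq (PySem.Dict.mk direct_matches)) (get_rm_freq remaining_words)
      = pvElimLetters remaining_words direct_matches := by
  simp only [elim_m]
  rw [← PySem.List.dedup_eq_ofList]
  have hstep : (fun (r : List Char) (l : Char) =>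
      if (get_dm_freq (PySem.Dict.mk direct_matches)).contains (String.mk [l]) = false then r ++ [l]
      else if (get_rm_freq remaining_words).getD l 0
          ≠ (get_dm_freq (PySem.Dict.mk direct_matches)).getD (String.mk [l]) 0 * (remaining_words.length : Int)
        then r ++ [l] else r)
      = fun (r : List Char) (l : Char) =>
          if pvRemCond remaining_words direct_matches l then r ++ [id l] else r := by
    funext r l
    unfold pvRemCond
    rw [pvDmFreqContains]
    by_cases hc : (PySem.Dict.mk direct_matches).contains (String.mk [l]) = true
    · have hk : String.mk [l] ∈ (PySem.Dict.mk direct_matches).keys := by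
        rw [PySem.Dict.contains_eq_decide_mem_keys] at hc; simpa using hc
      rw [pvDmFreqGetD _ _ hk]
      unfold get_rm_freq
      rw [PySem.Dict.getD_counter]
      simp only [hc]
      by_cases hne : ((PySem.Str.join "" remaining_words).toList.count l : Int)
          ≠ (((PySem.Dict.mk direct_matches).getD (String.mk [l]) []).length : Int) * (remaining_words.length : Int)
      · simp
      · simp at hne; simp [hne]
    · simp only [Bool.not_eq_true] at hc
      simp [hc]
  simp only [hstep]
  rw [PySem.List.foldl_append_if (pvRemCond remaining_words direct_matches) id]
  unfold pvElimLetters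
  simp

-- filtering distributes over building a PySem.Set by repeated add
theorem pvFilterAdd {α : Type} [BEq α] [LawfulBEq α] (p : α → Bool) (s : List α) (x : α) :
    (PySem.Set.add s x).filter p = if p x then PySem.Set.add (s.filter p) x else s.filter p := by
  unfold PySem.Set.add
  by_cases hp : p x
  · by_cases hm : x ∈ s
    · have hmf : x ∈ s.filter p := List.mem_filter.mpr ⟨hm, hp⟩
      simp [List.contains_eq_mem, hm, hmf, hp]
    · have hmf : x ∉ s.filter p := fun h => hm (List.mem_filter.mp h).1
      simp [List.contains_eq_mem, hm, hmf, hp, List.filter_append]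
  · by_cases hm : x ∈ s <;> simp [List.contains_eq_mem, hm, hp, List.filter_append]

theorem pvFilterFold {α : Type} [BEq α] [LawfulBEq α] (p : α → Bool) :
    ∀ (xs s : List α),
      (xs.foldl PySem.Set.add s).filter p = (xs.filter p).foldl PySem.Set.add (s.filter p) := by
  intro xs
  induction xs with
  | nil => intro s; rfl
  | cons x t ih =>
      intro s
      simp only [List.foldl_cons, ih, List.filter_cons]
      rw [pvFilterAdd]
      by_cases h : p x <;> simp [h]

theorem pvRemBEq (remaining_words : List String) (direct_matches : List (String × List String)) :
    ((PySem.Str.join "" remaining_words).toList.foldl (fun s l =>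
        if (PySem.Dict.mk direct_matches).contains (String.mk [l]) = false ∨
           (PySem.Dict.counter (PySem.Str.join "" remaining_words).toList).getD l 0
             ≠ (((PySem.Dict.mk direct_matches).getD (String.mk [l]) []).length : Int) * (remaining_words.length : Int)
        then PySem.Set.add s l else s) PySem.Set.empty)
      = pvElimLetters remaining_words direct_matches := by
  have hstep : (fun (s : PySem.Set Char) (l : Char) =>
      if (PySem.Dict.mk direct_matches).contains (String.mk [l]) = false ∨
         (PySem.Dict.counter (PySem.Str.join "" remaining_words).toList).getD l 0
           ≠ (((PySem.Dict.mk direct_matches).getD (String.mk [l]) []).length : Int) * (remaining_words.length : Int)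
      then PySem.Set.add s l else s)
      = fun (s : PySem.Set Char) (l : Char) =>
          if pvRemCond remaining_words direct_matches l then PySem.Set.add s l else s := by
    funext s l
    unfold pvRemCond
    rw [PySem.Dict.getD_counter]
    by_cases hc : (PySem.Dict.mk direct_matches).contains (String.mk [l]) = true
    · simp only [hc]
      by_cases hne : ((PySem.Str.join "" remaining_words).toList.count l : Int)
          ≠ (((PySem.Dict.mk direct_matches).getD (String.mk [l]) []).length : Int) * (remaining_words.length : Int)
      · simp
      · simp at hne; simp [hne]
    · simp only [Bool.not_eq_true] at hc
      simp [hc]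
  simp only [hstep]
  have hff : (PySem.Str.join "" remaining_words).toList.foldl
      (fun s l => if pvRemCond remaining_words direct_matches l then PySem.Set.add s l else s)
      PySem.Set.empty
        = (PySem.Set.ofList (PySem.Str.join "" remaining_words).toList).filter
            (pvRemCond remaining_words direct_matches) := by
    rw [show (PySem.Set.empty : PySem.Set Char) = ([] : List Char) from rfl,
        ← List.foldl_filter, PySem.Set.ofList_eq_foldl, pvFilterFold]
    rfl
  rw [hff]
  unfold pvElimLetters
  rw [PySem.List.dedup_eq_ofList]

theorem pvHeadDCongr {α : Type} (l : List α) (h : l ≠ []) (a b : α) : l.headD a = l.headD b := by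
  cases l with
  | nil => exact absurd rfl h
  | cons x t => rfl

-- ---- the running maximum of f over a word list ----

theorem pvMaxfSeed (f : String → Int) (hf0 : ∀ w, 0 ≤ f w) :
    ∀ (L : List String) (a : Int), 0 ≤ a →
      L.foldl (fun x w => max x (f w)) a = max a (L.foldl (fun x w => max x (f w)) 0) := by
  intro L
  induction L with
  | nil => intro a ha; simpa using by omega
  | cons w t ih =>
      intro a ha
      simp only [List.foldl_cons]
      rw [ih (max a (f w)) (by have := hf0 w; omega), ih (max 0 (f w)) (by have := hf0 w; omega)]
      omega

theorem pvMaxfCons (f : String → Int) (hf0 : ∀ w, 0 ≤ f w) (w : String) (t : List String) :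
    (w :: t).foldl (fun x w => max x (f w)) 0
      = max (f w) (t.foldl (fun x w => max x (f w)) 0) := by
  simp only [List.foldl_cons]
  rw [pvMaxfSeed f hf0 t (max 0 (f w)) (by have := hf0 w; omega)]
  have := hf0 w; omega

theorem pvMaxfNonneg (f : String → Int) (L : List String) :
    0 ≤ L.foldl (fun x w => max x (f w)) 0 :=
  (PySem.List.le_foldl_max_int L f 0).1

theorem pvMaxfAttain (f : String → Int) (hf0 : ∀ w, 0 ≤ f w) :
    ∀ (L : List String), 0 < L.foldl (fun x w => max x (f w)) 0 →
      ∃ w ∈ L, f w = L.foldl (fun x w => max x (f w)) 0 := by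
  intro L
  induction L with
  | nil => intro h; simp at h
  | cons w t ih =>
      intro h
      rw [pvMaxfCons f hf0] at h ⊢
      by_cases hc : t.foldl (fun x w => max x (f w)) 0 ≤ f w
      · exact ⟨w, List.mem_cons_self, by omega⟩
      · obtain ⟨w', hw', he⟩ := ih (by omega)
        exact ⟨w', List.mem_cons_of_mem _ hw', by omega⟩

theorem pvMaxfLeBound (f : String → Int) (k : Int) :
    ∀ (L : List String), (∀ w ∈ L, f w ≤ k) → ∀ (a : Int), a ≤ k →
      L.foldl (fun x w => max x (f w)) a ≤ k := by
  intro L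
  induction L with
  | nil => intro _ a ha; simpa using ha
  | cons w t ih =>
      intro hb a ha
      simp only [List.foldl_cons]
      exact ih (fun w' hw' => hb w' (List.mem_cons_of_mem _ hw'))
        (max a (f w)) (by have := hb w List.mem_cons_self; omega)

-- ---- A's buckets ----

theorem pvBucketGetD (f : String → Int) :
    ∀ (L : List String) (d : PySem.Dict Int (List String)) (c : Int),
      (L.foldl (fun d w => d.modify (f w) [] (· ++ [w])) d).getD c []
        = d.getD c [] ++ L.filter (fun w => f w == c) := by
  intro L
  induction L with
  | nil => intro d c; simp
  | cons w t ih =>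
      intro d c
      simp only [List.foldl_cons, ih, PySem.Dict.getD_modify, List.filter_cons]
      by_cases h : f w = c
      · simp [h]
      · simp [h, Ne.symm h]

theorem pvInitGetD (c : Int) :
    (PySem.Dict.mk ([(0, []), (1, []), (2, []), (3, []), (4, []), (5, [])] :
        List (Int × List String))).getD c [] = [] := by
  simp only [PySem.Dict.getD_eq_get?_getD, PySem.Dict.get?_mk_cons]
  split_ifs <;> rfl

-- descending index list 5,4,…,1
def pvDesc : Nat → List Int
  | 0 => []
  | k + 1 => ((k : Int) + 1) :: pvDesc k

theorem pvDesc5 : PySem.List.pyRange 5 0 (-1) = pvDesc 5 := by decide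

theorem pvPickEq (f : String → Int) (hf0 : ∀ w, 0 ≤ f w) (L : List String)
    (ints : PySem.Dict Int (List String))
    (hb : ∀ c : Int, ints.getD c [] = L.filter (fun w => f w == c)) :
    ∀ (k : Nat), L.foldl (fun x w => max x (f w)) 0 ≤ (k : Int) →
      cleanup_pick ints (pvDesc k)
        = (if 0 < L.foldl (fun x w => max x (f w)) 0 then
            (L.filter (fun w => f w == L.foldl (fun x w => max x (f w)) 0)).headD "" else "") := by
  intro k
  induction k with
  | zero =>
      intro hk
      have h0 := pvMaxfNonneg f L
      simp only [pvDesc, cleanup_pick]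
      rw [if_neg (by simp at hk; omega)]
  | succ k ih =>
      intro hk
      simp only [pvDesc, cleanup_pick, hb]
      by_cases hM : L.foldl (fun x w => max x (f w)) 0 = (k : Int) + 1
      · obtain ⟨w, hw, he⟩ := pvMaxfAttain f hf0 L (by omega)
        have hne : L.filter (fun w => f w == (k : Int) + 1) ≠ [] := by
          intro hnil
          have : w ∈ L.filter (fun w => f w == (k : Int) + 1) := by
            simp [List.mem_filter, hw, he, hM]
          rw [hnil] at this; simp at this
        rw [if_pos hne, if_pos (by omega), ← hM]
      · have hk' : L.foldl (fun x w => max x (f w)) 0 ≤ (k : Int) := by push_cast at hk ⊢; omega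
        have hnil : L.filter (fun w => f w == (k : Int) + 1) = [] := by
          rw [List.filter_eq_nil_iff]
          intro w hw
          have := (PySem.List.le_foldl_max_int L f 0).2 w hw
          simp only [beq_iff_eq]; omega
        rw [if_neg (by simp [hnil])]
        exact ih hk'

-- ---- B's strict argmax pass ----

theorem pvArgmaxFold (f : String → Int) (hf0 : ∀ w, 0 ≤ f w) :
    ∀ (L : List String) (b0 : String) (c0 : Int), 0 ≤ c0 →
      L.foldl (fun (bc : String × Int) w => if bc.2 < f w then (w, f w) else bc) (b0, c0)
        = (if c0 < L.foldl (fun x w => max x (f w)) 0 then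
             (L.filter (fun w => f w == L.foldl (fun x w => max x (f w)) 0)).headD b0 else b0,
           max c0 (L.foldl (fun x w => max x (f w)) 0)) := by
  intro L
  induction L with
  | nil => intro b0 c0 h0; simp; omega
  | cons w t ih =>
      intro b0 c0 h0
      rw [pvMaxfCons f hf0]
      have hMt0 := pvMaxfNonneg f t
      simp only [List.foldl_cons, List.filter_cons]
      by_cases hs : c0 < f w
      · rw [if_pos hs, ih w (f w) (hf0 w)]
        by_cases hc : f w < t.foldl (fun x w => max x (f w)) 0
        · have hM : max (f w) (t.foldl (fun x w => max x (f w)) 0)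
              = t.foldl (fun x w => max x (f w)) 0 := by omega
          rw [hM, if_pos hc, if_pos (by omega), if_neg (by simp; omega)]
          obtain ⟨w', hw', he⟩ := pvMaxfAttain f hf0 t (by have := hf0 w; omega)
          have hne : t.filter (fun w => f w == t.foldl (fun x w => max x (f w)) 0) ≠ [] := by
            intro hnil
            have : w' ∈ t.filter (fun w => f w == t.foldl (fun x w => max x (f w)) 0) := by
              simp [List.mem_filter, hw', he]
            rw [hnil] at this; simp at this
          simp only [Prod.mk.injEq]
          exact ⟨pvHeadDCongr _ hne _ _, by omega⟩
        · have hM : max (f w) (t.foldl (fun x w => max x (f w)) 0) = f w := by omega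
          rw [hM, if_neg hc, if_pos hs, if_pos (by simp)]
          simp only [Prod.mk.injEq, List.headD_cons]
          exact ⟨trivial, by omega⟩
      · rw [if_neg hs, ih b0 c0 h0]
        by_cases hc : c0 < t.foldl (fun x w => max x (f w)) 0
        · have hM : max (f w) (t.foldl (fun x w => max x (f w)) 0)
              = t.foldl (fun x w => max x (f w)) 0 := by omega
          rw [hM, if_pos hc, if_pos hc, if_neg (by simp; omega)]
        · rw [if_neg hc, if_neg (by omega)]
          simp only [Prod.mk.injEq]
          exact ⟨trivial, by omega⟩

-- ===== VERDICT (by name: the statement is the Claim_ definition above) =====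
theorem get_cleanup_word_spec : Claim_equal_get_cleanup_word := by
  unfold Claim_equal_get_cleanup_word
  intro all_words remaining_words direct_matches _ hpre
  unfold Spec_get_cleanup_word
  unfold Pre_get_cleanup_word at hpre
  have hnd : (pvElimLetters remaining_words direct_matches).Nodup := by
    unfold pvElimLetters
    exact (PySem.List.nodup_dedup _).filter _
  have hofl : PySem.Set.ofList (pvElimLetters remaining_words direct_matches)
      = pvElimLetters remaining_words direct_matches :=
    PySem.Set.ofList_eq_self_of_nodup _ hnd
  have hf0 : ∀ w : String, 0 ≤ PySem.Set.len
      (PySem.Set.inter (pvElimLetters remaining_words direct_matches) w.toList) := by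
    intro w
    exact Int.natCast_nonneg _
  have hfw : ∀ w ∈ all_words, PySem.Set.len
      (PySem.Set.inter (pvElimLetters remaining_words direct_matches) w.toList) ≤ 5 := by
    intro w hw
    have h := hpre w hw
    unfold PySem.Set.len PySem.Set.inter
    have he : (pvElimLetters remaining_words direct_matches).filter
          (fun x => PySem.Set.contains w.toList x)
        = (pvElimLetters remaining_words direct_matches).filter (fun l => decide (l ∈ w.toList)) := by
      apply List.filter_congr
      intro x _
      simp [PySem.Set.contains_eq_listContains, List.contains_eq_mem]
    rw [he]
    exact_mod_cast h
  have hb : ∀ c : Int,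
      (find_intersections all_words (PySem.Set.ofList (pvElimLetters remaining_words direct_matches))).getD c []
        = all_words.filter (fun w => PySem.Set.len
            (PySem.Set.inter (pvElimLetters remaining_words direct_matches) w.toList) == c) := by
    intro c
    unfold find_intersections
    rw [hofl, pvBucketGetD
      (fun w => PySem.Set.len (PySem.Set.inter (pvElimLetters remaining_words direct_matches) w.toList)),
      pvInitGetD]
    rfl
  have hA : get_cleanup_word all_words remaining_words direct_matches
      = (if 0 < all_words.foldl (fun x w => max x (PySem.Set.len
            (PySem.Set.inter (pvElimLetters remaining_words direct_matches) w.toList))) 0 then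
          (all_words.filter (fun w => PySem.Set.len
            (PySem.Set.inter (pvElimLetters remaining_words direct_matches) w.toList)
              == all_words.foldl (fun x w => max x (PySem.Set.len
                (PySem.Set.inter (pvElimLetters remaining_words direct_matches) w.toList))) 0)).headD ""
          else "") := by
    simp only [get_cleanup_word, pvElimEq, pvDesc5]
    exact pvPickEq _ hf0 all_words _ hb 5
      (by exact_mod_cast pvMaxfLeBound _ 5 all_words hfw 0 (by norm_num))
  have hB : get_cleanup_word_alt all_words remaining_words direct_matches
      = (if 0 < all_words.foldl (fun x w => max x (PySem.Set.len
            (PySem.Set.inter (pvElimLetters remaining_words direct_matches) w.toList))) 0 then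
          (all_words.filter (fun w => PySem.Set.len
            (PySem.Set.inter (pvElimLetters remaining_words direct_matches) w.toList)
              == all_words.foldl (fun x w => max x (PySem.Set.len
                (PySem.Set.inter (pvElimLetters remaining_words direct_matches) w.toList))) 0)).headD ""
          else "") := by
    simp only [get_cleanup_word_alt, pvRemBEq]
    rw [pvArgmaxFold _ hf0 all_words "" 0 (le_refl 0)]
  rw [hA, hB]
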